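-- pv_equiv track=rewrite | github.com/maandree/passcheck | passcheck.py | search_cmp
-- ===== SOURCE A (Python) =====
-- def search_cmp(haystack, needle):
--     haystack = haystack + [10]
--     h, n = 0, 0
--     too_low = False
--     too_high = False
--     while True:
--         while True:
--             hh, nn = haystack[h], needle[n]
--             if (hh == 10) or (nn == 10):
--                 if hh == nn:
--                     return 0
--                 break
--             else:
--                 d = hh - nn
--                 if d != 0:
--                     if d < 0:
--                         too_low = True
--                         break
--                     else:
--                         return None if too_low else 1
--             h, n = h + 1, n + 1
--         h, n = h + haystack[h:].index(10) + 1, 0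
--         too_low  = too_low  or (hh == 10)
--         too_high = too_high or (nn == 10)
--         if h == len(haystack):
--             return None if (too_low and too_high) else (-1 if too_low else 1)
-- ===== SOURCE B (Python) =====
-- def search_cmp(haystack, needle):
--     # Compare needle (up to its first newline) against the newline-separated
--     # lines of haystack, one line at a time, using Python's built-in list
--     # comparison; lines are located with list.index instead of a char loop.
--     n = needle[:needle.index(10)] if 10 in needle else needle
--     size = len(haystack)
--     too_low = False
--     too_high = False
--     pos = 0
--     while True:
--         try:
--             end = haystack.index(10, pos)
--         except ValueError:
--             end = size
--         line = haystack[pos:end]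
--         if line == n:
--             return 0
--         if line < n:
--             too_low = True
--         elif line[:len(n)] == n:
--             too_high = True
--         else:
--             return None if too_low else 1
--         pos = end + 1
--         if pos > size:
--             return None if (too_low and too_high) else (-1 if too_low else 1)
-- ===== Notes on version B (the rewrite author's own statement) =====
-- stated objective: alternative
-- what changed: B walks the newline-separated lines with list.index/slicing and compares each whole line to the newline-truncated needle with Python's built-in list comparison, replacing A's character-level state machine whose per-line jump re-slices the whole remaining haystack.
-- outside the precondition, e.g. on search_cmp([98, 10, 97], [97]): A returns 1, B returns 1
import Mathlib
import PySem

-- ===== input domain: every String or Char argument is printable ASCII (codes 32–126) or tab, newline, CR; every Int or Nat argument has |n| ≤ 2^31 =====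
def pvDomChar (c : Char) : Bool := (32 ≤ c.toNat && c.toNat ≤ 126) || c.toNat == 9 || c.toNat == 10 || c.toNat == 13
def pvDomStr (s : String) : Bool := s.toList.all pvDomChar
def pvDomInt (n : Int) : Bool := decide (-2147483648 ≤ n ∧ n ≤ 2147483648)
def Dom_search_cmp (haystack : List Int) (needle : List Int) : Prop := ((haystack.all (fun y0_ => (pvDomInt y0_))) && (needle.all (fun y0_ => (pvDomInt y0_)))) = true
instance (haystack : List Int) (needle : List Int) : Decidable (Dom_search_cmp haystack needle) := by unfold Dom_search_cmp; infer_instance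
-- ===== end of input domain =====

-- B walks the newline-separated lines with index/slice and a per-line lexicographic list
-- comparison instead of A's character-level state machine (a different algorithm, similar cost).

-- ===== PORT A =====
-- Result of A's inner `while True` loop: an early `return r`, or a `break`
-- carrying the last-read pair (hh, nn), the too_low flag and the index h.
inductive AStep
  | ret : Option Int → AStep
  | brk : Int → Int → Bool → Nat → AStep
deriving DecidableEq, Repr

-- A's inner loop.  h, n are the running nonnegative indices, so Python's
-- haystack[h] / needle[n] are the in-range reads hs[h]? / ns[n]? (none = IndexError,
-- excluded by Pre_).  fuel is only a termination guard (h grows each step and is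
-- bounded by hs.length, so hs.length + 1 fuel is never exhausted).
def searchCmpInner (hs ns : List Int) (fuel : Nat) (h n : Nat) (tl : Bool) : AStep :=
  match fuel with
  | 0 => .ret none
  | fuel + 1 =>
    match hs[h]?, ns[n]? with
    | some hh, some nn =>
      if hh = 10 ∨ nn = 10 then
        (if hh = nn then .ret (some 0) else .brk hh nn tl h)
      else
        let d := hh - nn
        if d ≠ 0 then
          (if d < 0 then .brk hh nn true h else .ret (if tl then none else some 1))
        else searchCmpInner hs ns fuel (h + 1) (n + 1) tl
    | _, _ => .ret none

-- A's outer `while True` loop; again fuel is only a termination guard (h strictly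
-- grows per iteration).  `haystack[h:].index(10)` is PySem slice + index?
-- (index? none = ValueError; unreachable since hs ends in 10).
def searchCmpOuter (hs ns : List Int) (fuel : Nat) (h : Nat) (tl th : Bool) : Option Int :=
  match fuel with
  | 0 => none
  | fuel + 1 =>
    match searchCmpInner hs ns (hs.length + 1) h 0 tl with
    | .ret r => r
    | .brk hh nn tl' hb =>
      match PySem.List.index? (PySem.List.slice hs (some (hb : Int)) none) 10 with
      | none => none
      | some i =>
        let h' := hb + i + 1
        let tl2 := tl' || decide (hh = 10)
        let th2 := th || decide (nn = 10)
        if h' = hs.length then (if tl2 && th2 then none else if tl2 then some (-1) else some 1)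
        else searchCmpOuter hs ns fuel h' tl2 th2

def search_cmp (haystack : List Int) (needle : List Int) : Option Int :=
  let hs := haystack ++ [10]
  searchCmpOuter hs needle (hs.length + 1) 0 false false

-- ===== PORT B =====
-- Python's `<` on lists of ints (lexicographic, shorter prefix smaller).
def pyListLt : List Int → List Int → Bool
  | [], [] => false
  | [], _ :: _ => true
  | _ :: _, [] => false
  | a :: as_, b :: bs => if a < b then true else if b < a then false else pyListLt as_ bs

-- B's `while True` loop over the newline-separated lines: `haystack.index(10, pos)`
-- is index? on the suffix (ValueError → size), `haystack[pos:end]` is a slice.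
-- fuel is only a termination guard (pos grows past a newline each iteration).
def altAux (haystack n : List Int) (fuel : Nat) (pos : Nat) (tl th : Bool) : Option Int :=
  match fuel with
  | 0 => none
  | fuel + 1 =>
    let e : Nat := match PySem.List.index? (haystack.drop pos) 10 with
             | some i => pos + i
             | none => haystack.length
    let line := PySem.List.slice haystack (some (pos : Int)) (some (e : Int))
    if line = n then some 0
    else
      -- shared tail of the loop body: pos = end + 1 and the exit check
      let step : Bool → Bool → Option Int := fun tl' th' =>
        if e + 1 > haystack.length then
          (if tl' && th' then none else if tl' then some (-1) else some 1)
        else altAux haystack n fuel (e + 1) tl' th'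
      if pyListLt line n then step true th
      else if line.take n.length = n then step tl true
      else (if tl then none else some 1)

def search_cmp_alt (haystack : List Int) (needle : List Int) : Option Int :=
  -- n = needle[:needle.index(10)] if 10 in needle else needle
  let n := match PySem.List.index? needle 10 with
           | some i => needle.take i
           | none => needle
  altAux haystack n (haystack.length + 2) 0 false false

-- ===== PRECONDITION & SPEC =====
-- The newline-separated lines of a chunk (closed form, used only by Pre_/Raises_).
def pvLines : List Int → List (List Int)
  | [] => [[]]
  | c :: cs =>
    if c = 10 then [] :: pvLines cs
    else match pvLines cs with
         | [] => [[c]]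
         | l :: ls => (c :: l) :: ls

-- Pre_ excludes exactly the inputs where a newline-free needle is a prefix of some line of
-- haystack: there A either raises IndexError reading past needle's end, or (when an earlier
-- greater line ends the scan first) still returns — one sentence + cite in claim.json.
def Pre_search_cmp (haystack : List Int) (needle : List Int) : Prop :=
  (10 : Int) ∈ needle ∨ ∀ L ∈ pvLines haystack, ¬ needle.IsPrefix L
instance (haystack : List Int) (needle : List Int) : Decidable (Pre_search_cmp haystack needle) := by
  unfold Pre_search_cmp; infer_instance

def pvWitness_search_cmp : List Int × List Int := ([97, 10, 98], [98, 10])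

def Spec_search_cmp (haystack : List Int) (needle : List Int) (out : Option Int) : Prop := out = search_cmp_alt haystack needle
instance (haystack : List Int) (needle : List Int) (out : Option Int) : Decidable (Spec_search_cmp haystack needle out) := by unfold Spec_search_cmp; infer_instance

-- ===== CLAIM (what is proved, stated in full; the proofs are below) =====
def Claim_equal_search_cmp : Prop := ∀ (haystack : List Int) (needle : List Int), Dom_search_cmp haystack needle → Pre_search_cmp haystack needle → Spec_search_cmp haystack needle (search_cmp haystack needle)

-- ===== LEMMAS AND PROOFS =====

-- Abstract outcome of one line of A's inner loop: return, or break with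
-- (hh = 10?), (nn = 10?), the new too_low flag and the number of consumed chars.
inductive IRes
  | iret : Option Int → IRes
  | ibrk : Bool → Bool → Bool → Nat → IRes
deriving DecidableEq, Repr

def ibump : IRes → IRes
  | .iret r => .iret r
  | .ibrk a b c k => .ibrk a b c (k + 1)

def innerSpec : List Int → List Int → Bool → IRes
  | _, [], _ => .iret none
  | [], nn :: _, tl => if nn = 10 then .iret (some 0) else .ibrk true false tl 0
  | hh :: line', nn :: nd', tl =>
    if nn = 10 then .ibrk false true tl 0
    else if hh < nn then .ibrk false false true 0
    else if nn < hh then .iret (if tl then none else some 1)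
    else ibump (innerSpec line' nd' tl)

def outerSpec : List (List Int) → List Int → Bool → Bool → Option Int
  | [], _, tl, th => if tl && th then none else if tl then some (-1) else some 1
  | line :: ls, nd, tl, th =>
    match innerSpec line nd tl with
    | .iret r => r
    | .ibrk bh bn tl' _ => outerSpec ls nd (tl' || bh) (th || bn)

def joinl : List (List Int) → List Int
  | [] => []
  | l :: ls => l ++ 10 :: joinl ls

theorem inner_eq (line : List Int) : ∀ (hs ns rest : List Int) (h n : Nat) (tl : Bool) (fuel : Nat),
    (10 : Int) ∉ line → hs.drop h = line ++ 10 :: rest → line.length < fuel →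
    (∃ r, innerSpec line (ns.drop n) tl = .iret r ∧ searchCmpInner hs ns fuel h n tl = .ret r) ∨
    (∃ hh nn tl' k, innerSpec line (ns.drop n) tl = .ibrk (decide (hh = 10)) (decide (nn = 10)) tl' k ∧
      searchCmpInner hs ns fuel h n tl = .brk hh nn tl' (h + k) ∧ k ≤ line.length) := by
  induction line with
  | nil =>
    intro hs ns rest h n tl fuel _ hdrop hfuel
    obtain ⟨f, rfl⟩ : ∃ f, fuel = f + 1 := ⟨fuel - 1, by omega⟩
    have hh10 : hs[h]? = some 10 := by
      have h0 : (hs.drop h)[0]? = some 10 := by rw [hdrop]; rfl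
      rwa [List.getElem?_drop, Nat.add_zero] at h0
    cases hnd : ns.drop n with
    | nil =>
      have hn : ns[n]? = none := by
        have h0 : (ns.drop n)[0]? = none := by rw [hnd]; rfl
        rwa [List.getElem?_drop, Nat.add_zero] at h0
      exact Or.inl ⟨none, rfl, by simp [searchCmpInner, hh10, hn]⟩
    | cons nn nd' =>
      have hn : ns[n]? = some nn := by
        have h0 : (ns.drop n)[0]? = some nn := by rw [hnd]; rfl
        rwa [List.getElem?_drop, Nat.add_zero] at h0
      by_cases h10 : nn = 10
      · subst h10
        exact Or.inl ⟨some 0, by simp [innerSpec], by simp [searchCmpInner, hh10, hn]⟩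
      · refine Or.inr ⟨10, nn, tl, 0, ?_, ?_, by simp⟩
        · simp [innerSpec, h10]
        · have h10' : ¬ ((10:Int) = nn) := fun h => h10 h.symm
          simp [searchCmpInner, hh10, hn, h10']
  | cons a line' ih =>
    intro hs ns rest h n tl fuel hten hdrop hfuel
    obtain ⟨f, rfl⟩ : ∃ f, fuel = f + 1 := ⟨fuel - 1, by omega⟩
    have ha10 : a ≠ 10 := fun h' => hten (by simp [h'])
    have hha : hs[h]? = some a := by
      have h0 : (hs.drop h)[0]? = some a := by rw [hdrop]; rfl
      rwa [List.getElem?_drop, Nat.add_zero] at h0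
    cases hnd : ns.drop n with
    | nil =>
      have hn : ns[n]? = none := by
        have h0 : (ns.drop n)[0]? = none := by rw [hnd]; rfl
        rwa [List.getElem?_drop, Nat.add_zero] at h0
      exact Or.inl ⟨none, rfl, by simp [searchCmpInner, hha, hn]⟩
    | cons nn nd' =>
      have hn : ns[n]? = some nn := by
        have h0 : (ns.drop n)[0]? = some nn := by rw [hnd]; rfl
        rwa [List.getElem?_drop, Nat.add_zero] at h0
      by_cases h10 : nn = 10
      · subst h10
        refine Or.inr ⟨a, 10, tl, 0, ?_, ?_, by simp⟩
        · simp [innerSpec, ha10]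
        · simp [searchCmpInner, hha, hn, ha10]
      · by_cases hlt : a < nn
        · have d1 : a - nn ≠ 0 := by omega
          have d2 : a - nn < 0 := by omega
          refine Or.inr ⟨a, nn, true, 0, ?_, ?_, by simp⟩
          · simp [innerSpec, h10, hlt, ha10]
          · simp [searchCmpInner, hha, hn, ha10, h10, d1, d2]
        · by_cases hgt : nn < a
          · have d1 : a - nn ≠ 0 := by omega
            have d2 : ¬ (a - nn < 0) := by omega
            refine Or.inl ⟨(if tl then none else some 1), ?_, ?_⟩
            · simp [innerSpec, h10, hlt, hgt]
            · simp [searchCmpInner, hha, hn, ha10, h10, d1, d2]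
          · have heq : a = nn := by omega
            have hdrop' : hs.drop (h + 1) = line' ++ 10 :: rest := by
              have h2 := congrArg List.tail hdrop
              rw [List.tail_drop] at h2
              simpa using h2
            have hnd' : ns.drop (n + 1) = nd' := by
              have h2 := congrArg List.tail hnd
              rw [List.tail_drop] at h2
              simpa using h2
            have step : searchCmpInner hs ns (f + 1) h n tl = searchCmpInner hs ns f (h + 1) (n + 1) tl := by
              have d0 : ¬ (a - nn ≠ 0) := by omega
              simp [searchCmpInner, hha, hn, ha10, h10, d0]
            have hspec : innerSpec (a :: line') (nn :: nd') tl = ibump (innerSpec line' nd' tl) := by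
              simp [innerSpec, h10, hlt, hgt]
            have hten' : (10 : Int) ∉ line' := fun hm => hten (by simp [hm])
            rcases ih hs ns rest (h + 1) (n + 1) tl f hten' hdrop' (by simp at hfuel; omega) with
              ⟨r, hsp, hpt⟩ | ⟨hh, nn2, tl2, k, hsp, hpt, hk⟩
            · rw [hnd'] at hsp
              exact Or.inl ⟨r, by rw [hspec, hsp]; rfl, by rw [step, hpt]⟩
            · rw [hnd'] at hsp
              refine Or.inr ⟨hh, nn2, tl2, k + 1, ?_, ?_, by simp; omega⟩
              · rw [hspec, hsp]; rfl
              · rw [step, hpt]; congr 1; omega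

theorem index?_ten (l rest : List Int) (hl : (10 : Int) ∉ l) :
    PySem.List.index? (l ++ 10 :: rest) 10 = some l.length := by
  induction l with
  | nil => simpa using PySem.List.index?_cons_self (x := (10:Int)) (xs := rest)
  | cons x l ih =>
    have hx : x ≠ 10 := fun h => hl (by simp [h])
    rw [List.cons_append, PySem.List.index?_cons_of_ne (x := x) (v := 10) (xs := l ++ 10 :: rest) hx,
      ih (fun h => hl (by simp [h]))]
    simp

theorem joinl_ne_nil (l : List Int) (ls : List (List Int)) : joinl (l :: ls) ≠ [] := by
  simp [joinl]

theorem outer_eq (ls : List (List Int)) : ∀ (hs ns : List Int) (h : Nat) (tl th : Bool) (fuel : Nat),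
    (∀ L ∈ ls, (10 : Int) ∉ L) → ls ≠ [] → hs.drop h = joinl ls → ls.length ≤ fuel →
    searchCmpOuter hs ns fuel h tl th = outerSpec ls ns tl th := by
  induction ls with
  | nil => intro _ _ _ _ _ _ _ hne _ _; exact absurd rfl hne
  | cons line ls' ih =>
    intro hs ns h tl th fuel hten _ hdrop hfuel
    obtain ⟨f, rfl⟩ : ∃ f, fuel = f + 1 := ⟨fuel - 1, by simp at hfuel; omega⟩
    have hdropj : hs.drop h = line ++ 10 :: joinl ls' := by simpa [joinl] using hdrop
    have hlen : (hs.drop h).length = line.length + 1 + (joinl ls').length := by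
      rw [hdropj]; simp; omega
    have hlendrop : (hs.drop h).length = hs.length - h := List.length_drop
    have hhl : h + line.length + 1 ≤ hs.length := by omega
    have hfuel_inner : line.length < hs.length + 1 := by omega
    have hdrop2 : hs.drop (h + line.length + 1) = joinl ls' := by
      have e1 : hs.drop (h + line.length + 1) = (hs.drop h).drop (line.length + 1) := by
        rw [List.drop_drop]; congr 1; try omega
      rw [e1, hdropj, show line ++ 10 :: joinl ls' = (line ++ [10]) ++ joinl ls' by simp,
        show line.length + 1 = (line ++ [10]).length by simp, List.drop_left]
    rcases inner_eq line hs ns (joinl ls') h 0 tl (hs.length + 1) (hten line (by simp)) hdropj hfuel_inner with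
      ⟨r, hsp, hpt⟩ | ⟨hh, nn, tl', k, hsp, hpt, hk⟩
    · rw [List.drop_zero] at hsp
      simp only [searchCmpOuter, hpt, outerSpec, hsp]
    · rw [List.drop_zero] at hsp
      have hdk : hs.drop (h + k) = line.drop k ++ 10 :: joinl ls' := by
        have e1 : hs.drop (h + k) = (hs.drop h).drop k := by rw [List.drop_drop]
        rw [e1, hdropj, List.drop_append_of_le_length hk]
      have hten' : (10 : Int) ∉ line.drop k := fun hm => hten line (by simp) (List.mem_of_mem_drop hm)
      have hidx : PySem.List.index? (PySem.List.slice hs (some ((h + k : Nat) : Int)) none) 10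
          = some (line.length - k) := by
        rw [PySem.List.slice_from_natCast, hdk, index?_ten _ _ hten']
        simp
      simp only [searchCmpOuter, hpt, hidx]
      have harith : h + k + (line.length - k) + 1 = h + line.length + 1 := by omega
      rw [harith]
      simp only [outerSpec, hsp]
      cases hls' : ls' with
      | nil =>
        have hend : h + line.length + 1 = hs.length := by
          subst hls'
          have : hs.drop (h + line.length + 1) = [] := by simpa [joinl] using hdrop2
          have := List.drop_eq_nil_iff.mp this
          omega
        rw [if_pos hend]
        simp [outerSpec]
      | cons l2 ls2 =>
        have hne2 : joinl ls' ≠ [] := by rw [hls']; exact joinl_ne_nil _ _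
        have hlt2 : h + line.length + 1 < hs.length := by
          rcases Nat.lt_or_ge (h + line.length + 1) hs.length with hlt | hge
          · exact hlt
          · exact absurd (List.drop_eq_nil_of_le hge ▸ hdrop2).symm hne2
        rw [if_neg (by omega)]
        rw [← hls']
        exact ih hs ns (h + line.length + 1) _ _ f
          (fun L hL => hten L (by simp [hL])) (by rw [hls']; simp) hdrop2 (by simp at hfuel; omega)

theorem pvLines_ne_nil (x : List Int) : pvLines x ≠ [] := by
  induction x with
  | nil => simp [pvLines]
  | cons c cs ih =>
    simp only [pvLines]
    split
    · simp
    · split <;> simp_all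

theorem joinl_pvLines (x : List Int) : joinl (pvLines x) = x ++ [10] := by
  induction x with
  | nil => simp [pvLines, joinl]
  | cons c cs ih =>
    simp only [pvLines]
    split
    · subst_eqs; simp [joinl, ih]
    · cases h : pvLines cs with
      | nil => exact absurd h (pvLines_ne_nil cs)
      | cons l ls => rw [h] at ih; simp [joinl] at ih ⊢; simp [ih]

theorem pvLines_no_ten (x : List Int) : ∀ L ∈ pvLines x, (10 : Int) ∉ L := by
  induction x with
  | nil => simp [pvLines]
  | cons c cs ih =>
    simp only [pvLines]
    split
    next hc =>
      intro L hL
      rcases List.mem_cons.mp hL with h | h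
      · simp [h]
      · exact ih L h
    next hc =>
      cases h : pvLines cs with
      | nil => exact absurd h (pvLines_ne_nil cs)
      | cons l ls =>
        rw [h] at ih
        intro L hL
        rcases List.mem_cons.mp hL with h' | h'
        · subst h'
          intro hmem
          rcases List.mem_cons.mp hmem with h10 | h10
          · exact hc h10.symm
          · exact ih l (List.mem_cons_self) h10
        · exact ih L (List.mem_cons_of_mem _ h')

theorem pvLines_length_le (x : List Int) : (pvLines x).length ≤ x.length + 1 := by
  induction x with
  | nil => simp [pvLines]
  | cons c cs ih =>
    simp only [pvLines]
    split
    · simp; omega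
    · split <;> simp_all <;> omega

theorem a_eq_outerSpec (haystack needle : List Int) :
    search_cmp haystack needle = outerSpec (pvLines haystack) needle false false := by
  have h := outer_eq (pvLines haystack) (haystack ++ [10]) needle 0 false false
    ((haystack ++ [10]).length + 1)
    (pvLines_no_ten haystack) (pvLines_ne_nil haystack)
    (by rw [List.drop_zero, joinl_pvLines])
    (by have := pvLines_length_le haystack; simp; omega)
  simpa [search_cmp] using h

-- B side

theorem take_index?_eq_takeWhile (needle : List Int) :
    (match PySem.List.index? needle 10 with
     | some i => needle.take i
     | none => needle) = needle.takeWhile (· ≠ 10) := by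
  induction needle with
  | nil => simp [PySem.List.index?_eq_idxOf?]
  | cons c cs ih =>
    by_cases hc : c = 10
    · subst hc; rw [PySem.List.index?_cons_self]; simp [List.takeWhile_cons]
    · rw [PySem.List.index?_cons_of_ne (x := c) (v := 10) (xs := cs) hc]
      cases h : PySem.List.index? cs 10 with
      | none =>
        rw [h] at ih
        simp only [Option.map_none]
        simp only [List.takeWhile_cons, hc]
        simp only [show (decide (c ≠ 10)) = true by simp [hc]]
        simp
        simpa using ih
      | some i =>
        rw [h] at ih
        simp only [Option.map_some]
        simp only [List.takeWhile_cons]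
        simp [hc]
        simpa using ih

theorem takeWhile_of_no_ten (nd : List Int) (h : (10 : Int) ∉ nd) :
    nd.takeWhile (· ≠ 10) = nd := by
  induction nd with
  | nil => rfl
  | cons c cs ih =>
    have hc : c ≠ 10 := fun h' => h (by simp [h'])
    simp only [List.takeWhile_cons, show (decide (c ≠ 10)) = true by simpa using hc, if_true]
    rw [ih (fun hm => h (by simp [hm]))]

theorem pyListLt_cons_cons (a b : Int) (as_ bs : List Int) :
    pyListLt (a :: as_) (b :: bs) = if a < b then true else if b < a then false else pyListLt as_ bs := rfl

theorem pyListLt_nil_cons (b : Int) (bs : List Int) : pyListLt [] (b :: bs) = true := rfl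

theorem pyListLt_cons_nil (a : Int) (as_ : List Int) : pyListLt (a :: as_) [] = false := rfl

theorem innerSpec_classify (line : List Int) : ∀ (nd : List Int) (tl : Bool),
    (10 : Int) ∉ line →
    ((10 : Int) ∈ nd ∨ ¬ (nd.takeWhile (· ≠ 10)).IsPrefix line) →
    (line = nd.takeWhile (· ≠ 10) ∧ innerSpec line nd tl = .iret (some 0)) ∨
    (line ≠ nd.takeWhile (· ≠ 10) ∧ pyListLt line (nd.takeWhile (· ≠ 10)) = true ∧
      ∃ bh tl' k, innerSpec line nd tl = .ibrk bh false tl' k ∧ (tl' || bh) = true) ∨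
    (line ≠ nd.takeWhile (· ≠ 10) ∧ pyListLt line (nd.takeWhile (· ≠ 10)) = false ∧
      line.take (nd.takeWhile (· ≠ 10)).length = nd.takeWhile (· ≠ 10) ∧
      ∃ k, innerSpec line nd tl = .ibrk false true tl k) ∨
    (line ≠ nd.takeWhile (· ≠ 10) ∧ pyListLt line (nd.takeWhile (· ≠ 10)) = false ∧
      line.take (nd.takeWhile (· ≠ 10)).length ≠ nd.takeWhile (· ≠ 10) ∧
      innerSpec line nd tl = .iret (if tl then none else some 1)) := by
  induction line with
  | nil =>
    intro nd tl _ hside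
    cases nd with
    | nil =>
      rcases hside with h | h
      · simp at h
      · exact absurd (List.nil_prefix) h
    | cons nn nd' =>
      by_cases hnn : nn = 10
      · subst hnn
        exact Or.inl ⟨by simp [List.takeWhile_cons], by simp [innerSpec]⟩
      · have htw : (nn :: nd').takeWhile (· ≠ 10) = nn :: nd'.takeWhile (· ≠ 10) := by
          simp [List.takeWhile_cons, hnn]
        refine Or.inr (Or.inl ⟨?_, ?_, true, tl, 0, ?_, by simp⟩)
        · rw [htw]; simp
        · rw [htw, pyListLt_nil_cons]
        · simp [innerSpec, hnn]
  | cons a l' ih =>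
    intro nd tl hten hside
    have ha10 : a ≠ 10 := fun h' => hten (by simp [h'])
    cases nd with
    | nil =>
      rcases hside with h | h
      · simp at h
      · exact absurd (List.nil_prefix) h
    | cons nn nd' =>
      by_cases hnn : nn = 10
      · subst hnn
        refine Or.inr (Or.inr (Or.inl ⟨?_, ?_, ?_, 0, ?_⟩))
        · simp [List.takeWhile_cons]
        · simp [List.takeWhile_cons, pyListLt_cons_nil]
        · simp [List.takeWhile_cons]
        · simp [innerSpec]
      · have htw : (nn :: nd').takeWhile (· ≠ 10) = nn :: nd'.takeWhile (· ≠ 10) := by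
          simp [List.takeWhile_cons, hnn]
        by_cases hlt : a < nn
        · have hane : a ≠ nn := by omega
          refine Or.inr (Or.inl ⟨?_, ?_, false, true, 0, ?_, by simp⟩)
          · rw [htw]; simp [hane]
          · rw [htw, pyListLt_cons_cons, if_pos hlt]
          · simp [innerSpec, hnn, hlt]
        · by_cases hgt : nn < a
          · have hane : a ≠ nn := by omega
            refine Or.inr (Or.inr (Or.inr ⟨?_, ?_, ?_, ?_⟩))
            · rw [htw]; simp [hane]
            · rw [htw, pyListLt_cons_cons, if_neg hlt, if_pos hgt]
            · rw [htw]
              simp only [List.length_cons, List.take_succ_cons]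
              intro hc2
              exact hane (List.cons.inj hc2).1
            · simp [innerSpec, hnn, hlt, hgt]
          · have heq : a = nn := by omega
            have hside' : (10 : Int) ∈ nd' ∨ ¬ (nd'.takeWhile (· ≠ 10)).IsPrefix l' := by
              rcases hside with h | h
              · refine Or.inl ?_
                rcases List.mem_cons.mp h with h' | h'
                · exact absurd h'.symm hnn
                · exact h'
              · refine Or.inr (fun hp => h ?_)
                rw [htw, heq]
                exact List.cons_prefix_cons.mpr ⟨rfl, hp⟩
            have hbump : innerSpec (a :: l') (nn :: nd') tl = ibump (innerSpec l' nd' tl) := by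
              simp [innerSpec, hnn, hlt, hgt]
            have hten' : (10 : Int) ∉ l' := fun hm => hten (by simp [hm])
            rcases ih nd' tl hten' hside' with
              ⟨h1, h2⟩ | ⟨h1, h2, bh, tl', k, h3, h4⟩ | ⟨h1, h2, h3, k, h4⟩ | ⟨h1, h2, h3, h4⟩
            · exact Or.inl ⟨by rw [htw, heq, h1], by rw [hbump, h2]; rfl⟩
            · refine Or.inr (Or.inl ⟨?_, ?_, bh, tl', k + 1, ?_, h4⟩)
              · rw [htw]; intro hc2; exact h1 (List.cons.inj hc2).2
              · rw [htw, pyListLt_cons_cons, if_neg hlt, if_neg hgt]; exact h2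
              · rw [hbump, h3]; rfl
            · refine Or.inr (Or.inr (Or.inl ⟨?_, ?_, ?_, k + 1, ?_⟩))
              · rw [htw]; intro hc2; exact h1 (List.cons.inj hc2).2
              · rw [htw, pyListLt_cons_cons, if_neg hlt, if_neg hgt]; exact h2
              · rw [htw]
                simp only [List.length_cons, List.take_succ_cons]
                rw [heq, h3]
              · rw [hbump, h4]; rfl
            · refine Or.inr (Or.inr (Or.inr ⟨?_, ?_, ?_, ?_⟩))
              · rw [htw]; intro hc2; exact h1 (List.cons.inj hc2).2
              · rw [htw, pyListLt_cons_cons, if_neg hlt, if_neg hgt]; exact h2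
              · rw [htw]
                simp only [List.length_cons, List.take_succ_cons]
                intro hc2
                exact h3 (List.cons.inj hc2).2
              · rw [hbump, h4]; rfl

-- Proof-side reformulation of B's loop: one altLoop step per line.
def altLoop (n : List Int) : List (List Int) → Bool → Bool → Option Int
  | [], tl, th => if tl && th then none else if tl then some (-1) else some 1
  | line :: ls, tl, th =>
    if line = n then some 0
    else if pyListLt line n then altLoop n ls true th
    else if line.take n.length = n then altLoop n ls tl true
    else if tl then none else some 1

theorem pvLines_of_no_ten (x : List Int) (h : (10 : Int) ∉ x) : pvLines x = [x] := by
  induction x with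
  | nil => rfl
  | cons c cs ih =>
    have hc : ¬ c = 10 := fun h' => h (by simp [h'])
    simp only [pvLines, if_neg hc, ih (fun hm => h (by simp [hm]))]

theorem pvLines_split (pre rest : List Int) (h : (10 : Int) ∉ pre) :
    pvLines (pre ++ 10 :: rest) = pre :: pvLines rest := by
  induction pre with
  | nil => simp [pvLines]
  | cons c cs ih =>
    have hc : ¬ c = 10 := fun h' => h (by simp [h'])
    simp only [List.cons_append, pvLines, if_neg hc, ih (fun hm => h (by simp [hm]))]

theorem altAux_eq (haystack n : List Int) : ∀ (fuel pos : Nat) (tl th : Bool),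
    pos ≤ haystack.length → (pvLines (haystack.drop pos)).length < fuel →
    altAux haystack n fuel pos tl th = altLoop n (pvLines (haystack.drop pos)) tl th := by
  intro fuel
  induction fuel with
  | zero => intro pos tl th _ h; omega
  | succ f ih =>
    intro pos tl th hpos hlen
    cases hidx : PySem.List.index? (haystack.drop pos) 10 with
    | none =>
      have hno : (10 : Int) ∉ haystack.drop pos := (PySem.List.index?_eq_none_iff _ _).mp hidx
      have hline : PySem.List.slice haystack (some (pos : Int)) (some (haystack.length : Int))
          = haystack.drop pos := by
        rw [PySem.List.slice_natCast]
        exact List.take_of_length_le (by simp)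
      have hpl : pvLines (haystack.drop pos) = [haystack.drop pos] := pvLines_of_no_ten _ hno
      rw [hpl]
      simp only [altAux, hidx, hline]
      have hrec : ∀ tl' th', (if haystack.length + 1 > haystack.length then
            (if tl' && th' then none else if tl' then some (-1) else some 1)
          else altAux haystack n f (haystack.length + 1) tl' th')
          = (if tl' && th' then none else if tl' then some (-1) else some 1) := by
        intro tl' th'
        rw [if_pos (by omega)]
      by_cases h1 : haystack.drop pos = n
      · simp [altLoop, h1]
      · rw [if_neg h1]
        by_cases h2 : pyListLt (haystack.drop pos) n = true
        · simp only [altLoop, if_neg h1, if_pos h2, h2, if_true]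
          exact hrec true th
        · rw [Bool.not_eq_true] at h2
          by_cases h3 : (haystack.drop pos).take n.length = n
          · simp only [altLoop, if_neg h1, h2, Bool.false_eq_true, if_false, if_pos h3]
            exact hrec tl true
          · simp only [altLoop, if_neg h1, h2, Bool.false_eq_true, if_false, if_neg h3]
    | some i =>
      obtain ⟨pre, suf, hsplit, hlen_pre, hno⟩ := (PySem.List.index?_eq_some_iff _ _ _).mp hidx
      have hline : PySem.List.slice haystack (some (pos : Int)) (some ((pos + i : Nat) : Int))
          = pre := by
        rw [PySem.List.slice_natCast, Nat.add_sub_cancel_left, hsplit, ← hlen_pre,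
          List.take_left]
      have hlensuf : (haystack.drop pos).length = pre.length + 1 + suf.length := by
        rw [hsplit]; simp; omega
      have hle : pos + i + 1 ≤ haystack.length := by
        have : (haystack.drop pos).length = haystack.length - pos := List.length_drop
        omega
      have hd2 : haystack.drop (pos + i + 1) = suf := by
        have e1 : haystack.drop (pos + i + 1) = (haystack.drop pos).drop (i + 1) := by
          rw [List.drop_drop]; congr 1; try omega
        rw [e1, hsplit, show pre ++ 10 :: suf = (pre ++ [10]) ++ suf by simp,
          show i + 1 = (pre ++ [10]).length by simp; omega, List.drop_left]
      have hpl : pvLines (haystack.drop pos) = pre :: pvLines suf := by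
        rw [hsplit, pvLines_split _ _ hno]
      rw [hpl]
      simp only [altAux, hidx, hline]
      have hexit : ¬ (pos + i + 1 > haystack.length) := by omega
      have hrec : ∀ tl' th', (if pos + i + 1 > haystack.length then
            (if tl' && th' then none else if tl' then some (-1) else some 1)
          else altAux haystack n f (pos + i + 1) tl' th') = altLoop n (pvLines suf) tl' th' := by
        intro tl' th'
        rw [if_neg hexit, ih (pos + i + 1) tl' th' hle (by rw [hd2]; rw [hpl] at hlen; simp at hlen; omega)]
        rw [hd2]
      by_cases h1 : pre = n
      · simp [altLoop, h1]
      · rw [if_neg h1]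
        by_cases h2 : pyListLt pre n = true
        · simp only [altLoop, if_neg h1, if_pos h2, h2, if_true]
          exact hrec true th
        · rw [Bool.not_eq_true] at h2
          by_cases h3 : pre.take n.length = n
          · simp only [altLoop, if_neg h1, h2, Bool.false_eq_true, if_false, if_pos h3]
            exact hrec tl true
          · simp only [altLoop, if_neg h1, h2, Bool.false_eq_true, if_false, if_neg h3]

theorem outerSpec_eq_altLoop (ls : List (List Int)) : ∀ (nd : List Int) (tl th : Bool),
    (∀ L ∈ ls, (10 : Int) ∉ L) →
    ((10 : Int) ∈ nd ∨ ∀ L ∈ ls, ¬ (nd.takeWhile (· ≠ 10)).IsPrefix L) →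
    outerSpec ls nd tl th = altLoop (nd.takeWhile (· ≠ 10)) ls tl th := by
  induction ls with
  | nil => intro nd tl th _ _; rfl
  | cons line ls' ih =>
    intro nd tl th hten hside
    have hside1 : (10 : Int) ∈ nd ∨ ¬ (nd.takeWhile (· ≠ 10)).IsPrefix line := by
      rcases hside with h | h
      · exact Or.inl h
      · exact Or.inr (h line (by simp))
    have hside' : (10 : Int) ∈ nd ∨ ∀ L ∈ ls', ¬ (nd.takeWhile (· ≠ 10)).IsPrefix L := by
      rcases hside with h | h
      · exact Or.inl h
      · exact Or.inr (fun L hL => h L (by simp [hL]))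
    have hten' : ∀ L ∈ ls', (10 : Int) ∉ L := fun L hL => hten L (by simp [hL])
    rcases innerSpec_classify line nd tl (hten line (by simp)) hside1 with
      ⟨h1, h2⟩ | ⟨h1, h2, bh, tl', k, h3, h4⟩ | ⟨h1, h2, h3, k, h4⟩ | ⟨h1, h2, h3, h4⟩
    · simp only [outerSpec, h2, altLoop]
      rw [if_pos h1]
    · simp only [outerSpec, h3, altLoop]
      rw [if_neg h1, if_pos h2, h4, Bool.or_false]
      exact ih nd true th hten' hside'
    · simp only [outerSpec, h4, altLoop]
      rw [if_neg h1]
      rw [if_neg (by rw [h2]; exact Bool.false_ne_true), if_pos h3, Bool.or_false, Bool.or_true]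
      exact ih nd tl true hten' hside'
    · simp only [outerSpec, h4, altLoop, h2, Bool.false_eq_true, if_false, if_neg h1, if_neg h3]

theorem b_eq_outerSpec (haystack needle : List Int) (hpre : Pre_search_cmp haystack needle) :
    search_cmp_alt haystack needle = outerSpec (pvLines haystack) needle false false := by
  have hside : (10 : Int) ∈ needle ∨
      ∀ L ∈ pvLines haystack, ¬ (needle.takeWhile (· ≠ 10)).IsPrefix L := by
    by_cases hmem : (10 : Int) ∈ needle
    · exact Or.inl hmem
    · rcases hpre with h | h
      · exact absurd h hmem
      · exact Or.inr (fun L hL => by rw [takeWhile_of_no_ten needle hmem]; exact h L hL)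
  simp only [search_cmp_alt]
  rw [take_index?_eq_takeWhile,
    altAux_eq haystack _ (haystack.length + 2) 0 false false (by omega)
      (by rw [List.drop_zero]; have := pvLines_length_le haystack; omega),
    List.drop_zero,
    ← outerSpec_eq_altLoop (pvLines haystack) needle false false (pvLines_no_ten haystack) hside]
-- ===== VERDICT (by name: the statement is the Claim_ definition above) =====
theorem search_cmp_spec : Claim_equal_search_cmp := by
  intro haystack needle _ hpre
  unfold Spec_search_cmp
  rw [a_eq_outerSpec, b_eq_outerSpec _ _ hpre]
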